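-- pv_equiv track=rewrite | github.com/hinesa18/Learning-Python | dice_gamble.py | format_inventory
-- ===== SOURCE A (Python) =====
-- def format_inventory(inventory):
--     if not inventory:
--         return "empty"
--     counts = {}
--     for item in inventory:
--         counts[item] = counts.get(item, 0) + 1
--     parts = []
--     for name in sorted(counts.keys()):
--         parts.append(f"{name} x{counts[name]}")
--     return ", ".join(parts)
-- ===== SOURCE B (Python) =====
-- def format_inventory(inventory):
--     if not inventory:
--         return "empty"
--     items = sorted(inventory)
--     n = len(items)
--     parts = []
--     i = 0
--     while i < n:
--         j = i + 1
--         while j < n and items[j] == items[i]: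
--             j += 1
--         parts.append(f"{items[i]} x{j - i}")
--         i = j
--     return ", ".join(parts)
-- ===== Notes on version B (the rewrite author's own statement) =====
-- stated objective: alternative
-- what changed: Replaces the count-dict-then-sort-keys approach by sorting the inventory once and run-length scanning adjacent equal runs with two indices; no dictionary is built.
import Mathlib
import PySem

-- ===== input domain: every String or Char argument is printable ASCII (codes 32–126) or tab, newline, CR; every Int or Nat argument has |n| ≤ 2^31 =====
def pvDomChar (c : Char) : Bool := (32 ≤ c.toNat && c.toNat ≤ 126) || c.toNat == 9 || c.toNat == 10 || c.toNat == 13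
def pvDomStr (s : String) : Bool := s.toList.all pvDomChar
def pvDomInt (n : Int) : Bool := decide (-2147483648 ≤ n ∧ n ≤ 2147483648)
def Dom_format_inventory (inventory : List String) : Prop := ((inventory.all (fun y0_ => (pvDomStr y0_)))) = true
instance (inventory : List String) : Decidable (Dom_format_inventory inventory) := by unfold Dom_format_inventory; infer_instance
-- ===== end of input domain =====

-- B replaces A's count-dict-then-sort-keys with sort-once-then-run-length-scan (alternative algorithm, same cost).

-- ===== PORT A =====
-- counts[name] in the second loop always finds its key (name ∈ counts.keys), so getD is exact there.
def format_inventory (inventory : List String) : String :=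
  if inventory = [] then "empty"
  else
    let counts : PySem.Dict String Int :=
      inventory.foldl (fun d item => d.insert item (d.getD item 0 + 1)) PySem.Dict.empty
    let parts : List String :=
      (PySem.List.sorted (PySem.Dict.keys counts) (fun x => x) false).foldl
        (fun ps name => ps ++ [name ++ " x" ++ PySem.Int.toStr (counts.getD name 0)]) []
    PySem.Str.join ", " parts

-- ===== PORT B =====
-- the inner while (counting the run, j - i) is the takeWhile length; the outer while resumes at the run's end (dropWhile)
def pvRuns : List String → List String
  | [] => []
  | x :: xs =>
      (x ++ " x" ++ PySem.Int.toStr (1 + ((xs.takeWhile (fun y => y == x)).length : Int)))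
        :: pvRuns (xs.dropWhile (fun y => y == x))
termination_by l => l.length
decreasing_by
  simpa using Nat.lt_succ_of_le (List.length_dropWhile_le _ _)

def format_inventory_alt (inventory : List String) : String :=
  if inventory = [] then "empty"
  else PySem.Str.join ", " (pvRuns (PySem.List.sorted inventory (fun x => x) false))

-- ===== PRECONDITION & SPEC =====
def Spec_format_inventory (inventory : List String) (out : String) : Prop := out = format_inventory_alt inventory
instance (inventory : List String) (out : String) : Decidable (Spec_format_inventory inventory out) := by unfold Spec_format_inventory; infer_instance

-- ===== CLAIM (what is proved, stated in full; the proofs are below) =====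
def Claim_equal_format_inventory : Prop := ∀ (inventory : List String), Dom_format_inventory inventory → Spec_format_inventory inventory (format_inventory inventory)

-- ===== LEMMAS AND PROOFS =====

-- run-length scan over a (≤-)sorted list = the sorted distinct names, each with its total count
theorem pvRuns_spec : ∀ (l : List String), l.Pairwise (· ≤ ·) →
    pvRuns l = (PySem.List.sorted (PySem.Set.ofList l) (fun x => x) false).map
      (fun x => x ++ " x" ++ PySem.Int.toStr (l.count x)) := by
  intro l
  induction l using pvRuns.induct with
  | case1 => intro _; simp [pvRuns, PySem.Set.ofList_nil, PySem.List.sorted]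
  | case2 x xs ih =>
    intro h
    have hpxs : xs.Pairwise (· ≤ ·) := h.of_cons
    have hxle : ∀ y ∈ xs, x ≤ y := fun y hy => List.rel_of_pairwise_cons h hy
    set t := xs.takeWhile (fun y => y == x) with ht
    set d := xs.dropWhile (fun y => y == x) with hd
    have htd : t ++ d = xs := List.takeWhile_append_dropWhile
    have hmt : ∀ y ∈ t, y = x := fun y hy =>
      eq_of_beq (List.mem_takeWhile_imp (p := fun z => z == x) hy)
    have hpd : d.Pairwise (· ≤ ·) := hpxs.sublist (List.dropWhile_sublist _)
    have hsubd : ∀ y ∈ d, y ∈ xs := fun y hy => (List.dropWhile_sublist _).mem hy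
    have hxd : ∀ y ∈ d, x < y := by
      intro y hy
      rcases hdd : d with _ | ⟨h0, d'⟩
      · rw [hdd] at hy; cases hy
      · have h0l : 0 < d.length := by rw [hdd]; simp
        have hh0 : ¬ ((d[0]'h0l == x) = true) := by
          have := List.dropWhile_get_zero_not (p := fun y => y == x) xs (hd ▸ h0l)
          simpa [← hd] using this
        have hh0x : h0 ≠ x := by
          intro hcontra
          apply hh0
          have : d[0]'h0l = h0 := by simp [hdd]
          rw [this, hcontra]; simp
        have hxh0 : x < h0 := lt_of_le_of_ne (hxle h0 (hsubd h0 (by rw [hdd]; simp))) (Ne.symm hh0x)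
        rw [hdd] at hy
        rcases List.mem_cons.mp hy with rfl | hy'
        · exact hxh0
        · exact lt_of_lt_of_le hxh0 (List.rel_of_pairwise_cons (hdd ▸ hpd) hy')
    have hxnd : x ∉ d := fun hx => lt_irrefl x (hxd x hx)
    have hynt : ∀ y ∈ d, y ∉ t := by
      intro y hy hyt
      exact absurd (hmt y hyt) (ne_of_gt (hxd y hy))
    -- sorted(set(x :: xs)) is x followed by sorted(set(d))
    have hnds : (PySem.List.sorted (PySem.Set.ofList d) (fun x => x) false).Nodup :=
      ((PySem.List.sorted_perm _ _ _).nodup_iff).mpr (PySem.Set.nodup_ofList _)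
    have hxns : x ∉ PySem.List.sorted (PySem.Set.ofList d) (fun x => x) false := by
      rw [PySem.List.mem_sorted, PySem.Set.mem_ofList]; exact hxnd
    have hsorted_eq : PySem.List.sorted (PySem.Set.ofList (x :: xs)) (fun x => x) false
        = x :: PySem.List.sorted (PySem.Set.ofList d) (fun x => x) false := by
      apply PySem.List.sorted_eq_of_perm_of_pairwise_lt
      · rw [List.perm_ext_iff_of_nodup (List.nodup_cons.mpr ⟨hxns, hnds⟩) (PySem.Set.nodup_ofList _)]
        intro a
        simp only [List.mem_cons, PySem.List.mem_sorted, PySem.Set.mem_ofList]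
        constructor
        · rintro (rfl | ha)
          · exact Or.inl rfl
          · exact Or.inr (hsubd a ha)
        · rintro (rfl | ha)
          · exact Or.inl rfl
          · rw [← htd] at ha
            rcases List.mem_append.mp ha with ha' | ha'
            · exact Or.inl (hmt a ha')
            · exact Or.inr ha'
      · refine List.pairwise_cons.mpr ⟨?_, PySem.List.sorted_ofList_pairwise_lt _⟩
        intro y hy
        exact hxd y (by rwa [PySem.List.mem_sorted, PySem.Set.mem_ofList] at hy)
    -- counts
    have hct : t.count x = t.length := List.count_eq_length.mpr (fun y hy => by simp [hmt y hy])
    have hcx : (x :: xs).count x = t.length + 1 := by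
      rw [List.count_cons_self, ← htd, List.count_append, hct, List.count_eq_zero.mpr hxnd]
    have hcy : ∀ y ∈ d, (x :: xs).count y = d.count y := by
      intro y hy
      rw [List.count_cons_of_ne (hxd y hy).ne, ← htd, List.count_append,
        List.count_eq_zero.mpr (hynt y hy), Nat.zero_add]
    -- assemble
    rw [show pvRuns (x :: xs)
        = (x ++ " x" ++ PySem.Int.toStr (1 + ((xs.takeWhile (fun y => y == x)).length : Int)))
          :: pvRuns (xs.dropWhile (fun y => y == x)) from by rw [pvRuns],
      hsorted_eq, List.map_cons]
    congr 1
    · rw [hcx, ← ht]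
      congr 2
      push_cast
      omega
    · rw [← hd, ih hpd]
      apply List.map_congr_left
      intro y hy
      rw [hcy y (by rwa [PySem.List.mem_sorted, PySem.Set.mem_ofList] at hy)]

theorem format_inventory_spec : Claim_equal_format_inventory := by
  intro inv _
  unfold Spec_format_inventory format_inventory format_inventory_alt
  by_cases hni : inv = []
  · simp [hni]
  · simp only [if_neg hni]
    have hperm : (PySem.List.sorted inv (fun x => x) false).Perm inv :=
      PySem.List.sorted_perm _ _ _
    have hcount : ∀ x, (PySem.List.sorted inv (fun x => x) false).count x = inv.count x :=
      fun x => hperm.count_eq x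
    have hsetperm : (PySem.Set.ofList (PySem.List.sorted inv (fun x => x) false)).Perm
        (PySem.Set.ofList inv) := by
      rw [List.perm_ext_iff_of_nodup (PySem.Set.nodup_ofList _) (PySem.Set.nodup_ofList _)]
      intro a
      rw [PySem.Set.mem_ofList, PySem.Set.mem_ofList, PySem.List.mem_sorted]
    have hsets : PySem.List.sorted (PySem.Set.ofList (PySem.List.sorted inv (fun x => x) false))
          (fun x => x) false
        = PySem.List.sorted (PySem.Set.ofList inv) (fun x => x) false :=
      PySem.List.sorted_eq_sorted_of_perm _ _ _ (fun _ _ hab => hab) hsetperm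
    rw [pvRuns_spec _ (PySem.List.sorted_pairwise _ _), hsets,
      PySem.Dict.foldl_insert_getD_add_one_eq_counter, PySem.Dict.keys_counter,
      PySem.List.foldl_append_singleton_eq_map]
    simp only [PySem.Dict.getD_counter, hcount, List.nil_append]
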